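-- pv_equiv track=rewrite | github.com/xfzhang823/TableLense | src/preprocessing/preprocessing_utils.py | a1_to_rc
-- ===== SOURCE A (Python) =====
-- def a1_to_rc(a1):
--     """Convert Excel A1 notation to 1-indexed row and column."""
--     col = 0
--     row = 0
--     for i, c in enumerate(a1):
--         if c.isdigit():
--             row = int(a1[i:])  # Excel rows are 1-indexed
--             break
--         col = col * 26 + (ord(c.upper()) - ord("A") + 1)
--     return row, col
-- ===== SOURCE B (Python) =====
-- def a1_to_rc(a1):
--     """Convert Excel A1 notation to 1-indexed row and column."""
--     n = len(a1)
--     idx = 0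
--     while idx < n and not a1[idx].isdigit():
--         idx += 1
--     row = int(a1[idx:]) if idx < n else 0
--     col, p = 0, 1
--     for c in reversed(a1[:idx]):          # right-to-left: positional value * running power
--         col += (ord(c.upper()) - ord("A") + 1) * p
--         p *= 26
--     return row, col
-- ===== Notes on version B (the rewrite author's own statement) =====
-- stated objective: alternative
-- what changed: Replaces A's fused break-loop with left-to-right Horner accumulation (col = col*26 + v) by a boundary-finding while loop, an independent int() parse of the digit suffix, and a right-to-left pass over the letter prefix that sums positional values against a running power of 26.
import Mathlib
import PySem

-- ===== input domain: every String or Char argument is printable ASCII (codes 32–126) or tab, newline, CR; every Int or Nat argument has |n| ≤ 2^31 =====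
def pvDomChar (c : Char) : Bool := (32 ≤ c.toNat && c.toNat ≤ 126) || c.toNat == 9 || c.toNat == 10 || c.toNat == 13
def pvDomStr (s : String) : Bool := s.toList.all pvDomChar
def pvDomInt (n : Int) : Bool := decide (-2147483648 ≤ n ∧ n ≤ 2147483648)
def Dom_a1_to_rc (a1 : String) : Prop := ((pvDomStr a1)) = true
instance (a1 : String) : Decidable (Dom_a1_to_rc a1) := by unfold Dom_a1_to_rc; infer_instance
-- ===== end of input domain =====

-- B finds the first-digit boundary, parses the row from the suffix, and computes the column
-- right-to-left over the letter prefix with a running power of 26; same cost, alternative decomposition.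

-- ===== PORT A =====
-- A's loop: remaining characters are exactly a1[i:]; on the first digit, row = int(a1[i:]) and break
def a1ToRcGo (cs : List Char) (col : Int) : Int × Int :=
  match cs with
  | [] => (0, col)
  | c :: rest =>
    if PySem.Chars.isdigit c then
      ((PySem.Int.ofChars? (c :: rest)).getD 0, col)   -- int() raise excluded by Pre_
    else
      a1ToRcGo rest (col * 26 + (((PySem.Chars.upperChar c).toNat : Int) - 65 + 1))

def a1_to_rc (a1 : String) : Int × Int := a1ToRcGo a1.toList 0

-- ===== PORT B =====
-- the while-loop finding the first digit index
def a1FindIdx (cs : List Char) (idx : Nat) : Nat :=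
  match cs with
  | [] => idx
  | c :: rest => if PySem.Chars.isdigit c then idx else a1FindIdx rest (idx + 1)

def a1_to_rc_alt (a1 : String) : Int × Int :=
  let cs := a1.toList
  let idx := a1FindIdx cs 0
  let row : Int := if idx < cs.length then (PySem.Int.ofChars? (cs.drop idx)).getD 0 else 0
  -- right-to-left pass over the letter prefix with a running power of 26
  let (col, _) := (cs.take idx).reverse.foldl
      (fun (cp : Int × Int) c =>
        (cp.1 + (((PySem.Chars.upperChar c).toNat : Int) - 65 + 1) * cp.2, cp.2 * 26))
      (0, 1)
  (row, col)

-- ===== PRECONDITION & SPEC =====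
-- Pre_ excludes exactly the inputs where int(a1[i:]) raises ValueError in A (B raises identically there):
-- the suffix from the first digit on must parse as a Python int (or there is no digit at all).
def Pre_a1_to_rc (a1 : String) : Prop :=
  a1.toList.dropWhile (fun c => !PySem.Chars.isdigit c) = [] ∨
  (PySem.Int.ofChars? (a1.toList.dropWhile (fun c => !PySem.Chars.isdigit c))).isSome = true
instance (a1 : String) : Decidable (Pre_a1_to_rc a1) := by unfold Pre_a1_to_rc; infer_instance
def pvWitness_a1_to_rc : String := "AB12"

def Spec_a1_to_rc (a1 : String) (out : Int × Int) : Prop := out = a1_to_rc_alt a1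
instance (a1 : String) (out : Int × Int) : Decidable (Spec_a1_to_rc a1 out) := by unfold Spec_a1_to_rc; infer_instance

-- ===== CLAIM (what is proved, stated in full; the proofs are below) =====
def Claim_equal_a1_to_rc : Prop := ∀ (a1 : String), Dom_a1_to_rc a1 → Pre_a1_to_rc a1 → Spec_a1_to_rc a1 (a1_to_rc a1)

-- ===== LEMMAS AND PROOFS =====

-- step function of B's right-to-left pass, named for the lemmas
def a1Step (cp : Int × Int) (c : Char) : Int × Int :=
  (cp.1 + (((PySem.Chars.upperChar c).toNat : Int) - 65 + 1) * cp.2, cp.2 * 26)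

-- the running power after folding the (reversed) letters ls is 26 ^ |ls|
lemma a1Step_snd (ls : List Char) :
    (ls.foldr (fun c cp => a1Step cp c) (0, 1)).2 = 26 ^ ls.length := by
  induction ls with
  | nil => rfl
  | cons c rest ih =>
    have h2 : ∀ x : Int × Int, (a1Step x c).2 = x.2 * 26 := fun _ => rfl
    simp only [List.foldr_cons, h2, ih, List.length_cons, pow_succ]

-- A's Horner accumulator over ls equals B's positional sum shifted by col * 26^|ls|
lemma horner_eq_foldr (ls : List Char) (col : Int) :
    ls.foldl (fun col c => col * 26 + (((PySem.Chars.upperChar c).toNat : Int) - 65 + 1)) col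
      = col * 26 ^ ls.length + (ls.foldr (fun c cp => a1Step cp c) (0, 1)).1 := by
  induction ls generalizing col with
  | nil => simp
  | cons c rest ih =>
    have h1 : ∀ x : Int × Int,
        (a1Step x c).1 = x.1 + (((PySem.Chars.upperChar c).toNat : Int) - 65 + 1) * x.2 :=
      fun _ => rfl
    simp only [List.foldl_cons, List.foldr_cons, ih, h1, a1Step_snd, List.length_cons]
    ring

-- the while-loop index shifts with its starting value
lemma a1FindIdx_succ (cs : List Char) (i : Nat) :
    a1FindIdx cs (i + 1) = a1FindIdx cs i + 1 := by
  induction cs generalizing i with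
  | nil => simp [a1FindIdx]
  | cons d ds ihd =>
    by_cases hd : PySem.Chars.isdigit d <;> simp [a1FindIdx, hd, ihd]

-- A's loop computed via B's pieces: split at the first digit index
lemma a1ToRcGo_eq (cs : List Char) (col : Int) :
    a1ToRcGo cs col =
      ((if a1FindIdx cs 0 < cs.length
          then (PySem.Int.ofChars? (cs.drop (a1FindIdx cs 0))).getD 0 else 0),
       (cs.take (a1FindIdx cs 0)).foldl
          (fun col c => col * 26 + (((PySem.Chars.upperChar c).toNat : Int) - 65 + 1)) col) := by
  induction cs generalizing col with
  | nil => simp [a1ToRcGo, a1FindIdx]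
  | cons c rest ih =>
    by_cases h : PySem.Chars.isdigit c
    · simp [a1ToRcGo, a1FindIdx, h]
    · simp [a1ToRcGo, a1FindIdx, h, a1FindIdx_succ, ih]

-- ===== VERDICT (by name: the statement is the Claim_ definition above) =====
theorem a1_to_rc_spec : Claim_equal_a1_to_rc := by
  intro a1 _ _
  unfold Spec_a1_to_rc a1_to_rc a1_to_rc_alt
  rw [a1ToRcGo_eq]
  simp only [List.foldl_reverse]
  simp [horner_eq_foldr]
  rfl
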